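-- pv_equiv track=rewrite | github.com/Ritten11/LAMAS2021 | ResistanceModel/mlsolver/model.py | create_relations
-- ===== SOURCE A (Python) =====
-- def create_relations(worlds, N):
--     relations = {}
--     for agent in range(1,N+1):
--         relations[str(agent)] = []
--
--     for agent in range(1, N+1):
--         for world1 in worlds:
--             for world2 in worlds:
--                 if world1 != world2:
--                     if str(agent) in world1 and str(agent) in world2 and (world2, world1) not in relations[str(agent)]:
--                         relations[str(agent)].append((world1,world2))
--                     if str(agent) not in world1 and str(agent) not in world2 and (world2, world1) not in relations[str(agent)]:
--                         relations[str(agent)].append((world1,world2))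
--     for x in relations:
--         relations[x] = set(relations[x])
--     return relations
-- ===== SOURCE B (Python) =====
-- def create_relations(worlds, N):
--     # One pass over deduplicated worlds: precompute each world's membership flag
--     # once, then emit each unordered pair exactly once (earlier world first).
--     unique = list(dict.fromkeys(worlds))
--     result = {}
--     for agent in range(1, N + 1):
--         s = str(agent)
--         tagged = [(w, s in w) for w in unique]
--         pairs = set()
--         rest = tagged
--         while rest:
--             (w1, f1) = rest[0]
--             rest = rest[1:]
--             for (w2, f2) in rest:
--                 if f1 == f2:
--                     pairs.add((w1, w2))
--         result[s] = pairs
--     return result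
-- ===== Notes on version B (the rewrite author's own statement) =====
-- stated objective: faster
-- what changed: Instead of scanning all ordered world pairs per agent and testing each against the growing relation list (a quadratic inner membership scan), B deduplicates the worlds once, precomputes each world's membership flag once per agent, and emits each unordered same-group pair exactly once (earlier world first) directly into the set.
import Mathlib
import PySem

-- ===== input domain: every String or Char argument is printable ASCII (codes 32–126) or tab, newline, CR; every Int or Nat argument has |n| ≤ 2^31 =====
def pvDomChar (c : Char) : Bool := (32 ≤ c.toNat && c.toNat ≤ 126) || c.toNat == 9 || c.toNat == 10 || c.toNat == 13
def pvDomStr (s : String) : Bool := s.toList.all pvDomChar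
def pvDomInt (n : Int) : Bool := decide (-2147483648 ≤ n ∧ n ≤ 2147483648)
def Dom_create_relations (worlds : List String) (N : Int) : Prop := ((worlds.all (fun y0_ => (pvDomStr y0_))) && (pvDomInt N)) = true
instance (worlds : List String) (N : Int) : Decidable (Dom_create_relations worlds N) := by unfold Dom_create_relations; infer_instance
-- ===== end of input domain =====

-- B deduplicates the worlds once, computes each world's membership flag once per agent, and emits
-- each unordered same-group pair exactly once (earlier world first), instead of A's scan of all
-- ordered pairs with a membership test against the growing relation list (objective: faster).

-- ===== PORT A =====
-- Python reads/updates relations[str(agent)] where the key is always present (created by the first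
-- loop); the lookup is ported as getD _ [] / modify _ [] _, exact on every reachable lookup.
def create_relations (worlds : List String) (N : Int) : List (String × List (String × String)) :=
  let agents := PySem.List.pyRange 1 (N + 1) 1
  let rel0 : PySem.Dict String (List (String × String)) :=
    agents.foldl (fun d agent => d.insert (PySem.Int.toStr agent) []) PySem.Dict.empty
  let rel1 := agents.foldl (fun d agent =>
    worlds.foldl (fun d world1 =>
      worlds.foldl (fun d world2 =>
        if world1 ≠ world2 then
          let d1 := if PySem.Str.isIn (PySem.Int.toStr agent) world1 = true ∧
                       PySem.Str.isIn (PySem.Int.toStr agent) world2 = true ∧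
                       (world2, world1) ∉ d.getD (PySem.Int.toStr agent) [] then
                      d.modify (PySem.Int.toStr agent) [] (· ++ [(world1, world2)]) else d
          if PySem.Str.isIn (PySem.Int.toStr agent) world1 = false ∧
             PySem.Str.isIn (PySem.Int.toStr agent) world2 = false ∧
             (world2, world1) ∉ d1.getD (PySem.Int.toStr agent) [] then
            d1.modify (PySem.Int.toStr agent) [] (· ++ [(world1, world2)]) else d1
        else d) d) d) rel0
  let rel2 := rel1.keys.foldl (fun d x => d.insert x (PySem.Set.ofList (d.getD x []))) rel1
  rel2.items

-- ===== PORT B =====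
-- 'while rest: (w1, f1) = rest[0]; rest = rest[1:]; for (w2, f2) in rest: …' from Source B
def pvPairsLoop (rest : List (String × Bool)) (pairs : PySem.Set (String × String)) :
    PySem.Set (String × String) :=
  match rest with
  | [] => pairs
  | (w1, f1) :: rest' =>
    pvPairsLoop rest' (rest'.foldl (fun s p => if p.2 = f1 then PySem.Set.add s (w1, p.1) else s) pairs)

def create_relations_alt (worlds : List String) (N : Int) : List (String × List (String × String)) :=
  let unique := PySem.List.dedup worlds
  ((PySem.List.pyRange 1 (N + 1) 1).foldl (fun res agent =>
      let s := PySem.Int.toStr agent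
      let tagged := unique.map (fun w => (w, PySem.Str.isIn s w))
      res.insert s (pvPairsLoop tagged PySem.Set.empty))
    (PySem.Dict.empty : PySem.Dict String (List (String × String)))).items

-- ===== PRECONDITION & SPEC =====
def Spec_create_relations (worlds : List String) (N : Int) (out : List (String × List (String × String))) : Prop := out = create_relations_alt worlds N
instance (worlds : List String) (N : Int) (out : List (String × List (String × String))) : Decidable (Spec_create_relations worlds N out) := by unfold Spec_create_relations; infer_instance

-- ===== CLAIM (what is proved, stated in full; the proofs are below) =====
def Claim_equal_create_relations : Prop := ∀ (worlds : List String) (N : Int), Dom_create_relations worlds N → Spec_create_relations worlds N (create_relations worlds N)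

-- ===== LEMMAS AND PROOFS =====

lemma pv_toDigitsCore_append (b : Nat) : ∀ (f n : Nat) (acc : List Char),
    Nat.toDigitsCore b f n acc = Nat.toDigitsCore b f n [] ++ acc := by
  intro f
  induction f with
  | zero => intro n acc; simp [Nat.toDigitsCore]
  | succ f ih =>
    intro n acc
    simp only [Nat.toDigitsCore]
    by_cases h : n / b = 0
    · simp [h]
    · simp only [h, if_false]
      rw [ih (n / b) ((n % b).digitChar :: acc), ih (n / b) [(n % b).digitChar]]
      simp

def pvVal (cs : List Char) : Nat := cs.foldl (fun v c => 10 * v + (c.toNat - 48)) 0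

lemma pv_digitChar_toNat {n : Nat} (h : n < 10) : (Nat.digitChar n).toNat = 48 + n := by
  interval_cases n <;> rfl

lemma pv_val_append (xs : List Char) (c : Char) :
    pvVal (xs ++ [c]) = 10 * pvVal xs + (c.toNat - 48) := by
  simp [pvVal, List.foldl_append]

lemma pv_val_toDigitsCore : ∀ (n f : Nat), n < f → pvVal (Nat.toDigitsCore 10 f n []) = n := by
  intro n
  induction n using Nat.strong_induction_on with
  | _ n ih =>
    intro f hf
    match f, hf with
    | f + 1, hf =>
      simp only [Nat.toDigitsCore]
      by_cases h : n / 10 = 0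
      · have hn : n < 10 := by omega
        simp only [h, if_pos, Nat.mod_eq_of_lt hn, pvVal, List.foldl_cons, List.foldl_nil]
        rw [pv_digitChar_toNat hn]
        omega
      · simp only [h, if_false]
        rw [pv_toDigitsCore_append, pv_val_append,
          ih (n / 10) (by omega) f (by omega), pv_digitChar_toNat (Nat.mod_lt n (by norm_num))]
        omega

lemma pv_toStr_inj {m n : Int} (hm : 0 ≤ m) (hn : 0 ≤ n)
    (h : PySem.Int.toStr m = PySem.Int.toStr n) : m = n := by
  have h2 : PySem.Int.toChars m = PySem.Int.toChars n := by
    have := congrArg String.toList h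
    simpa [PySem.Int.toStr] using this
  simp only [PySem.Int.toChars, if_neg (by omega : ¬ m < 0), if_neg (by omega : ¬ n < 0)] at h2
  have h3 : pvVal (Nat.toDigits 10 m.toNat) = pvVal (Nat.toDigits 10 n.toNat) := by rw [h2]
  rw [Nat.toDigits, Nat.toDigits, pv_val_toDigitsCore _ _ (by omega),
    pv_val_toDigitsCore _ _ (by omega)] at h3
  omega

lemma pv_nodup_agents (N : Int) : ((PySem.List.pyRange 1 (N + 1) 1).map PySem.Int.toStr).Nodup := by
  have h1 : (PySem.List.pyRange 1 (N + 1) 1).Nodup := by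
    simp only [PySem.List.pyRange]
    norm_num
    apply List.Nodup.map _ (List.nodup_range)
    intro a b hab
    simp at hab; omega
  apply h1.map_on
  intro x hx y hy hxy
  have hx1 := (PySem.List.mem_pyRange_one).mp hx
  have hy1 := (PySem.List.mem_pyRange_one).mp hy
  exact pv_toStr_inj (by omega) (by omega) hxy

def pvTailAfter (x : String) : List String → List String
  | [] => []
  | z :: u => if z = x then u else pvTailAfter x u

lemma pv_tailAfter_sublist (x : String) (u : List String) : (pvTailAfter x u).Sublist u := by
  induction u with
  | nil => simp [pvTailAfter]
  | cons z u ih =>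
    simp only [pvTailAfter]
    by_cases h : z = x
    · simp [h]
    · simp only [h, if_false]
      exact ih.cons z

lemma pv_mem_of_mem_tailAfter {x y : String} {u : List String} (h : y ∈ pvTailAfter x u) : y ∈ u :=
  (pv_tailAfter_sublist x u).mem h

lemma pv_not_self_tailAfter {x : String} {u : List String} (hnd : u.Nodup) :
    x ∉ pvTailAfter x u := by
  induction u with
  | nil => simp [pvTailAfter]
  | cons z u ih =>
    simp only [pvTailAfter]
    by_cases h : z = x
    · simp only [h, if_pos rfl]
      exact fun hx => (List.nodup_cons.mp hnd).1 (h ▸ hx)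
    · simp only [h, if_false]
      exact ih (List.nodup_cons.mp hnd).2

lemma pv_tailAfter_trichotomy {x y : String} {u : List String} (hx : x ∈ u) (hy : y ∈ u)
    (hxy : x ≠ y) : y ∈ pvTailAfter x u ∨ x ∈ pvTailAfter y u := by
  induction u with
  | nil => simp at hx
  | cons z u ih =>
    by_cases hzx : z = x
    · left; simp only [pvTailAfter, hzx, if_pos rfl]
      rcases List.mem_cons.mp hy with h | h
      · exact absurd (by rw [h, hzx]) (Ne.symm hxy)
      · exact h
    · by_cases hzy : z = y
      · right; simp only [pvTailAfter, hzy, if_pos rfl, hzx, if_neg hzx]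
        rcases List.mem_cons.mp hx with h | h
        · exact absurd (by rw [h, hzy]) hxy
        · exact h
      · have hx' : x ∈ u := by
          rcases List.mem_cons.mp hx with h | h
          · exact absurd h.symm hzx
          · exact h
        have hy' : y ∈ u := by
          rcases List.mem_cons.mp hy with h | h
          · exact absurd h.symm hzy
          · exact h
        simpa [pvTailAfter, hzx, hzy] using ih hx' hy'

lemma pv_tailAfter_asymm {x y : String} {u : List String} (hnd : u.Nodup)
    (h1 : y ∈ pvTailAfter x u) (h2 : x ∈ pvTailAfter y u) : False := by
  induction u with
  | nil => simp [pvTailAfter] at h1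
  | cons z u ih =>
    have hz : z ∉ u := (List.nodup_cons.mp hnd).1
    have hnd' : u.Nodup := (List.nodup_cons.mp hnd).2
    by_cases hzx : z = x
    · subst hzx
      simp only [pvTailAfter, if_pos rfl] at h1
      by_cases hzy : z = y
      · subst hzy; exact hz h1
      · simp only [pvTailAfter, if_neg hzy] at h2
        exact hz (pv_mem_of_mem_tailAfter h2)
    · by_cases hzy : z = y
      · subst hzy
        simp only [pvTailAfter, if_pos rfl] at h2
        simp only [pvTailAfter, if_neg hzx] at h1
        exact hz (pv_mem_of_mem_tailAfter h1)
      · simp only [pvTailAfter, if_neg hzx] at h1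
        simp only [pvTailAfter, if_neg hzy] at h2
        exact ih hnd' h1 h2

lemma pv_tailAfter_append_left {x : String} {q r : List String} (h : x ∉ q) :
    pvTailAfter x (q ++ r) = pvTailAfter x r := by
  induction q with
  | nil => rfl
  | cons z q ih =>
    simp only [List.mem_cons, not_or] at h
    simp [pvTailAfter, Ne.symm h.1, ih h.2]

lemma pv_prefix_closed {seen u : List String} {x y : String} (hpre : seen <+: u) (hnd : u.Nodup)
    (hx : x ∈ seen) (h : x ∈ pvTailAfter y u) : y ∈ seen := by
  obtain ⟨rest, rfl⟩ := hpre
  by_contra hy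
  have hxr : x ∈ pvTailAfter y rest := by rwa [pv_tailAfter_append_left hy] at h
  have : x ∈ rest := pv_mem_of_mem_tailAfter hxr
  exact (List.disjoint_of_nodup_append hnd) hx this

lemma pv_filter_mem_sublist {α : Type} [DecidableEq α] {t u : List α} (h : t.Sublist u)
    (hnd : u.Nodup) : u.filter (fun y => decide (y ∈ t)) = t := by
  induction h with
  | slnil => rfl
  | @cons t u a h ih =>
    have ha : a ∉ u := (List.nodup_cons.mp hnd).1
    have hat : a ∉ t := fun hm => ha (h.mem hm)
    rw [List.filter_cons_of_neg (by simpa using hat)]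
    exact ih (List.nodup_cons.mp hnd).2
  | @cons₂ t u a h ih =>
    have ha : a ∉ u := (List.nodup_cons.mp hnd).1
    have step : u.filter (fun y => decide (y ∈ a :: t)) = u.filter (fun y => decide (y ∈ t)) := by
      apply List.filter_congr
      intro b hb
      have : b ≠ a := fun hba => ha (hba ▸ hb)
      simp [List.mem_cons, this]
    rw [List.filter_cons_of_pos (by simp), step, ih (List.nodup_cons.mp hnd).2]

def pvBlockOf (P : String → Bool) (u : List String) (s : String) : List (String × String) :=
  ((pvTailAfter s u).filter (fun y => P y == P s)).map (fun y => (s, y))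

def pvBlocks (P : String → Bool) (u seen : List String) : List (String × String) :=
  seen.flatMap (pvBlockOf P u)

def pvCanon (P : String → Bool) : List String → List (String × String)
  | [] => []
  | x :: u => ((u.filter (fun y => P y == P x)).map (fun y => (x, y))) ++ pvCanon P u

lemma pv_mem_blocks {P : String → Bool} {u seen : List String} {a b : String} :
    (a, b) ∈ pvBlocks P u seen ↔ a ∈ seen ∧ P b = P a ∧ b ∈ pvTailAfter a u := by
  simp only [pvBlocks, List.mem_flatMap, pvBlockOf, List.mem_map, List.mem_filter]
  constructor
  · rintro ⟨s, hs, y, ⟨hy, hP⟩, heq⟩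
    obtain ⟨rfl, rfl⟩ := Prod.mk.injEq .. ▸ And.intro (congrArg Prod.fst heq) (congrArg Prod.snd heq)
    exact ⟨hs, by simpa using hP, hy⟩
  · rintro ⟨ha, hP, hb⟩
    exact ⟨a, ha, b, ⟨hb, by simpa using hP⟩, rfl⟩

lemma pv_blocks_append (P : String → Bool) (u seen : List String) (x : String) :
    pvBlocks P u (seen ++ [x]) = pvBlocks P u seen ++ pvBlockOf P u x := by
  simp [pvBlocks]

lemma pv_blocks_congr {P : String → Bool} {u v seen : List String}
    (h : ∀ s ∈ seen, pvTailAfter s u = pvTailAfter s v) :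
    pvBlocks P u seen = pvBlocks P v seen := by
  induction seen with
  | nil => rfl
  | cons s seen ih =>
    simp only [pvBlocks, List.flatMap_cons] at *
    rw [ih (fun t ht => h t (List.mem_cons_of_mem s ht))]
    have hs := h s (List.mem_cons_self ..)
    simp [pvBlockOf, hs]

lemma pv_blocks_self {P : String → Bool} {u : List String} (hnd : u.Nodup) :
    pvBlocks P u u = pvCanon P u := by
  induction u with
  | nil => rfl
  | cons x u ih =>
    have hx : x ∉ u := (List.nodup_cons.mp hnd).1
    have hnd' : u.Nodup := (List.nodup_cons.mp hnd).2
    have h1 : pvBlocks P (x :: u) (x :: u) = pvBlockOf P (x :: u) x ++ pvBlocks P (x :: u) u := by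
      simp [pvBlocks]
    rw [h1, pv_blocks_congr (v := u) (fun s hs => by
      have : ¬ x = s := fun h => hx (h ▸ hs)
      simp [pvTailAfter, this]), ih hnd']
    simp [pvCanon, pvBlockOf, pvTailAfter]

lemma pv_canon_fst {P : String → Bool} {u : List String} {p : String × String}
    (h : p ∈ pvCanon P u) : p.1 ∈ u := by
  induction u with
  | nil => simp [pvCanon] at h
  | cons x u ih =>
    simp only [pvCanon, List.mem_append, List.mem_map, List.mem_filter] at h
    rcases h with ⟨y, _, rfl⟩ | h
    · simp
    · simp [ih h]

lemma pv_canon_nodup {P : String → Bool} {u : List String} (hnd : u.Nodup) :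
    (pvCanon P u).Nodup := by
  induction u with
  | nil => simp [pvCanon]
  | cons x u ih =>
    have hx : x ∉ u := (List.nodup_cons.mp hnd).1
    have hnd' : u.Nodup := (List.nodup_cons.mp hnd).2
    simp only [pvCanon]
    apply List.Nodup.append
    · exact ((hnd'.filter _).map (fun a b hab => by simpa using congrArg Prod.snd hab))
    · exact ih hnd'
    · intro p hp hp'
      obtain ⟨y, hy, rfl⟩ := List.mem_map.mp hp
      exact hx (pv_canon_fst hp')

lemma pv_dedup_append_singleton (q : List String) (x : String) :
    PySem.List.dedup (q ++ [x]) =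
      if x ∈ PySem.List.dedup q then PySem.List.dedup q else PySem.List.dedup q ++ [x] := by
  simp only [PySem.List.dedup_eq_ofList, PySem.Set.ofList_append_singleton, PySem.Set.add,
    PySem.Set.contains]
  by_cases h : x ∈ PySem.Set.ofList q
  · rw [if_pos (List.contains_iff_mem.mpr h), if_pos h]
  · rw [if_neg (fun hc => h (List.contains_iff_mem.mp hc)), if_neg h]

lemma pv_dedup_prefix (q r : List String) :
    PySem.List.dedup q <+: PySem.List.dedup (q ++ r) := by
  simp only [PySem.List.dedup_eq_ofList, PySem.Set.ofList_append,
    PySem.Set.update_eq_append_filter]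
  exact ⟨_, rfl⟩

lemma pv_ofList_append_mem {α : Type} [BEq α] [LawfulBEq α] {L : List α} {p : α}
    (h : p ∈ PySem.Set.ofList L) : PySem.Set.ofList (L ++ [p]) = PySem.Set.ofList L := by
  rw [PySem.Set.ofList_append_singleton]
  simp only [PySem.Set.add, PySem.Set.contains]
  rw [if_pos (List.contains_iff_mem.mpr h)]

lemma pv_ofList_append_not_mem {α : Type} [BEq α] [LawfulBEq α] {L : List α} {p : α}
    (h : p ∉ PySem.Set.ofList L) :
    PySem.Set.ofList (L ++ [p]) = PySem.Set.ofList L ++ [p] := by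
  rw [PySem.Set.ofList_append_singleton]
  simp only [PySem.Set.add, PySem.Set.contains]
  rw [if_neg (fun hc => h (List.contains_iff_mem.mp hc))]

def pvStep (P : String → Bool) (L : List (String × String)) (w1 w2 : String) :
    List (String × String) :=
  if w1 ≠ w2 then
    let L1 := if P w1 = true ∧ P w2 = true ∧ (w2, w1) ∉ L then L ++ [(w1, w2)] else L
    if P w1 = false ∧ P w2 = false ∧ (w2, w1) ∉ L1 then L1 ++ [(w1, w2)] else L1
  else L

lemma pv_step_eq (P : String → Bool) (L : List (String × String)) (w1 w2 : String) :
    pvStep P L w1 w2 =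
      if w1 ≠ w2 ∧ P w1 = P w2 ∧ (w2, w1) ∉ L then L ++ [(w1, w2)] else L := by
  simp only [pvStep]
  by_cases h12 : w1 ≠ w2
  · simp only [if_pos h12]
    by_cases hP1 : P w1 <;> by_cases hP2 : P w2 <;>
      by_cases hm : (w2, w1) ∈ L <;>
      simp [hP1, hP2, hm, h12]
  · simp [h12]

def pvLoopA (P : String → Bool) (ws : List String) (L : List (String × String)) :
    List (String × String) :=
  ws.foldl (fun L w1 => ws.foldl (fun L w2 => pvStep P L w1 w2) L) L

def pvMk (ks : List String) (g : String → List (String × String)) :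
    PySem.Dict String (List (String × String)) :=
  PySem.Dict.mk (ks.map (fun t => (t, g t)))

lemma pv_mk_congr {ks : List String} {g1 g2 : String → List (String × String)}
    (h : ∀ t ∈ ks, g1 t = g2 t) : pvMk ks g1 = pvMk ks g2 := by
  simp only [pvMk, PySem.Dict.mk.injEq]
  exact List.map_congr_left (fun t ht => by rw [h t ht])

lemma pv_mk_getD {ks : List String} {s : String} (g : String → List (String × String))
    (hs : s ∈ ks) : (pvMk ks g).getD s [] = g s := by
  induction ks with
  | nil => simp at hs
  | cons k ks ih =>
    by_cases h : k = s
    · subst h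
      simp [pvMk, PySem.Dict.getD, PySem.Dict.get?]
    · have hs' : s ∈ ks := by
        rcases List.mem_cons.mp hs with h' | h'
        · exact absurd h'.symm h
        · exact h'
      have := ih hs'
      simpa [pvMk, PySem.Dict.getD, PySem.Dict.get?, List.find?_cons, h] using this

lemma pv_mk_contains {ks : List String} {s : String} (g : String → List (String × String))
    (hs : s ∈ ks) : (pvMk ks g).contains s = true := by
  simp only [pvMk, PySem.Dict.contains, List.any_map, List.any_eq_true]
  exact ⟨s, hs, by simp⟩

lemma pv_mk_insert {ks : List String} {s : String} (g : String → List (String × String))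
    (hs : s ∈ ks) (v : List (String × String)) :
    (pvMk ks g).insert s v = pvMk ks (fun t => if t = s then v else g t) := by
  simp only [PySem.Dict.insert, pv_mk_contains g hs, if_pos]
  simp only [pvMk, PySem.Dict.mk.injEq, List.map_map]
  apply List.map_congr_left
  intro t ht
  by_cases h : t = s <;> simp [h]

lemma pv_mk_keys (ks : List String) (g : String → List (String × String)) :
    (pvMk ks g).keys = ks := by
  show List.map (fun x => x.1) (ks.map (fun t => (t, g t))) = ks
  rw [List.map_map]
  exact (List.map_congr_left (fun t _ => rfl)).trans (List.map_id ks)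

lemma pv_dict_inner_step (s : String) {ks : List String} (hs : s ∈ ks)
    (g : String → List (String × String)) (w1 w2 : String) :
    (if w1 ≠ w2 then
        (if PySem.Str.isIn s w1 = false ∧ PySem.Str.isIn s w2 = false ∧
            (w2, w1) ∉ (if PySem.Str.isIn s w1 = true ∧ PySem.Str.isIn s w2 = true ∧
                          (w2, w1) ∉ (pvMk ks g).getD s [] then
                         (pvMk ks g).modify s [] (· ++ [(w1, w2)]) else pvMk ks g).getD s [] then
           (if PySem.Str.isIn s w1 = true ∧ PySem.Str.isIn s w2 = true ∧
               (w2, w1) ∉ (pvMk ks g).getD s [] then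
              (pvMk ks g).modify s [] (· ++ [(w1, w2)]) else pvMk ks g).modify s [] (· ++ [(w1, w2)])
         else (if PySem.Str.isIn s w1 = true ∧ PySem.Str.isIn s w2 = true ∧
                  (w2, w1) ∉ (pvMk ks g).getD s [] then
                 (pvMk ks g).modify s [] (· ++ [(w1, w2)]) else pvMk ks g))
      else pvMk ks g) =
      pvMk ks (fun t => if t = s then pvStep (fun w => PySem.Str.isIn s w) (g s) w1 w2 else g t) := by
  have hid : pvMk ks g = pvMk ks (fun t => if t = s then g s else g t) := by
    apply pv_mk_congr
    intro t ht
    by_cases hts : t = s <;> simp [hts]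
  by_cases h12 : w1 ≠ w2
  · rw [if_pos h12]
    rw [pv_mk_getD g hs]
    by_cases h1 : PySem.Str.isIn s w1 = true ∧ PySem.Str.isIn s w2 = true ∧ (w2, w1) ∉ g s
    · rw [if_pos h1]
      have hmod : (pvMk ks g).modify s [] (· ++ [(w1, w2)]) =
          pvMk ks (fun t => if t = s then g s ++ [(w1, w2)] else g t) := by
        rw [PySem.Dict.modify, pv_mk_getD g hs, pv_mk_insert g hs]
      rw [hmod, pv_mk_getD _ hs]
      simp only [if_pos rfl]
      rw [if_neg (fun hq => absurd hq.1 (by rw [h1.1]; decide))]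
      apply pv_mk_congr
      intro t ht
      by_cases hts : t = s
      · subst hts
        rw [if_pos rfl, if_pos rfl, pv_step_eq,
          if_pos ⟨h12, by rw [h1.1, h1.2.1], h1.2.2⟩]
      · simp [hts]
    · rw [if_neg h1, pv_mk_getD g hs]
      by_cases h2 : PySem.Str.isIn s w1 = false ∧ PySem.Str.isIn s w2 = false ∧ (w2, w1) ∉ g s
      · rw [if_pos h2, PySem.Dict.modify, pv_mk_getD g hs, pv_mk_insert g hs]
        apply pv_mk_congr
        intro t ht
        by_cases hts : t = s
        · subst hts
          rw [if_pos rfl, if_pos rfl, pv_step_eq,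
            if_pos ⟨h12, by rw [h2.1, h2.2.1], h2.2.2⟩]
        · simp [hts]
      · rw [if_neg h2, hid]
        apply pv_mk_congr
        intro t ht
        by_cases hts : t = s
        · rw [if_pos hts, if_pos hts, pv_step_eq, if_neg]
          rintro ⟨-, hPeq, hnm⟩
          by_cases hb : PySem.Str.isIn s w1 = true
          · exact h1 ⟨hb, by rw [← hPeq]; exact hb, hnm⟩
          · have hb' : PySem.Str.isIn s w1 = false := by
              cases hq : PySem.Str.isIn s w1
              · rfl
              · exact absurd hq hb
            exact h2 ⟨hb', by rw [← hPeq]; exact hb', hnm⟩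
        · simp [hts]
  · rw [if_neg h12, hid]
    apply pv_mk_congr
    intro t ht
    by_cases hts : t = s
    · rw [if_pos hts, if_pos hts, pv_step_eq, if_neg (fun hq => h12 hq.1)]
    · simp [hts]

lemma pv_dict_inner_fold (s : String) {ks : List String} (hs : s ∈ ks) (w1 : String) :
    ∀ (r : List String) (g : String → List (String × String)),
      r.foldl (fun d world2 =>
        if w1 ≠ world2 then
          (if PySem.Str.isIn s w1 = false ∧ PySem.Str.isIn s world2 = false ∧
              (world2, w1) ∉ (if PySem.Str.isIn s w1 = true ∧ PySem.Str.isIn s world2 = true ∧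
                                (world2, w1) ∉ d.getD s [] then
                               d.modify s [] (· ++ [(w1, world2)]) else d).getD s [] then
             (if PySem.Str.isIn s w1 = true ∧ PySem.Str.isIn s world2 = true ∧
                 (world2, w1) ∉ d.getD s [] then
                d.modify s [] (· ++ [(w1, world2)]) else d).modify s [] (· ++ [(w1, world2)])
           else (if PySem.Str.isIn s w1 = true ∧ PySem.Str.isIn s world2 = true ∧
                    (world2, w1) ∉ d.getD s [] then
                   d.modify s [] (· ++ [(w1, world2)]) else d))
        else d) (pvMk ks g) =
      pvMk ks (fun t => if t = s then
        r.foldl (fun L w2 => pvStep (fun w => PySem.Str.isIn s w) L w1 w2) (g s) else g t) := by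
  intro r
  induction r with
  | nil =>
    intro g
    simp only [List.foldl_nil]
    apply pv_mk_congr
    intro t ht
    by_cases hts : t = s <;> simp [hts]
  | cons y r ih =>
    intro g
    simp only [List.foldl_cons]
    rw [pv_dict_inner_step s hs g w1 y, ih]
    apply pv_mk_congr
    intro t ht
    by_cases hts : t = s <;> simp [hts]

lemma pv_dict_worlds_fold (s : String) {ks : List String} (hs : s ∈ ks) (ws : List String) :
    ∀ (r : List String) (g : String → List (String × String)),
      r.foldl (fun d world1 =>
        ws.foldl (fun d world2 =>
          if world1 ≠ world2 then
            (if PySem.Str.isIn s world1 = false ∧ PySem.Str.isIn s world2 = false ∧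
                (world2, world1) ∉ (if PySem.Str.isIn s world1 = true ∧ PySem.Str.isIn s world2 = true ∧
                                      (world2, world1) ∉ d.getD s [] then
                                     d.modify s [] (· ++ [(world1, world2)]) else d).getD s [] then
               (if PySem.Str.isIn s world1 = true ∧ PySem.Str.isIn s world2 = true ∧
                   (world2, world1) ∉ d.getD s [] then
                  d.modify s [] (· ++ [(world1, world2)]) else d).modify s [] (· ++ [(world1, world2)])
             else (if PySem.Str.isIn s world1 = true ∧ PySem.Str.isIn s world2 = true ∧
                      (world2, world1) ∉ d.getD s [] then
                     d.modify s [] (· ++ [(world1, world2)]) else d))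
          else d) d) (pvMk ks g) =
      pvMk ks (fun t => if t = s then
        r.foldl (fun L w1 => ws.foldl (fun L w2 =>
          pvStep (fun w => PySem.Str.isIn s w) L w1 w2) L) (g s) else g t) := by
  intro r
  induction r with
  | nil =>
    intro g
    simp only [List.foldl_nil]
    apply pv_mk_congr
    intro t ht
    by_cases hts : t = s <;> simp [hts]
  | cons w1 r ih =>
    intro g
    simp only [List.foldl_cons]
    rw [pv_dict_inner_fold s hs w1 ws g, ih]
    apply pv_mk_congr
    intro t ht
    by_cases hts : t = s <;> simp [hts]

lemma pv_dict_agents_fold (ws : List String) {ks : List String} :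
    ∀ (as : List Int) (g : String → List (String × String)),
      (∀ a ∈ as, PySem.Int.toStr a ∈ ks) → ((as.map PySem.Int.toStr).Nodup) →
      as.foldl (fun d agent =>
        ws.foldl (fun d world1 =>
          ws.foldl (fun d world2 =>
            if world1 ≠ world2 then
              (if PySem.Str.isIn (PySem.Int.toStr agent) world1 = false ∧
                  PySem.Str.isIn (PySem.Int.toStr agent) world2 = false ∧
                  (world2, world1) ∉ (if PySem.Str.isIn (PySem.Int.toStr agent) world1 = true ∧
                                        PySem.Str.isIn (PySem.Int.toStr agent) world2 = true ∧
                                        (world2, world1) ∉ d.getD (PySem.Int.toStr agent) [] then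
                                       d.modify (PySem.Int.toStr agent) [] (· ++ [(world1, world2)])
                                     else d).getD (PySem.Int.toStr agent) [] then
                 (if PySem.Str.isIn (PySem.Int.toStr agent) world1 = true ∧
                     PySem.Str.isIn (PySem.Int.toStr agent) world2 = true ∧
                     (world2, world1) ∉ d.getD (PySem.Int.toStr agent) [] then
                    d.modify (PySem.Int.toStr agent) [] (· ++ [(world1, world2)])
                  else d).modify (PySem.Int.toStr agent) [] (· ++ [(world1, world2)])
               else (if PySem.Str.isIn (PySem.Int.toStr agent) world1 = true ∧
                        PySem.Str.isIn (PySem.Int.toStr agent) world2 = true ∧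
                        (world2, world1) ∉ d.getD (PySem.Int.toStr agent) [] then
                       d.modify (PySem.Int.toStr agent) [] (· ++ [(world1, world2)])
                     else d))
            else d) d) d) (pvMk ks g) =
      pvMk ks (fun t => if t ∈ as.map PySem.Int.toStr then
        pvLoopA (fun w => PySem.Str.isIn t w) ws (g t) else g t) := by
  intro as
  induction as with
  | nil =>
    intro g _ _
    simp only [List.foldl_nil, List.map_nil]
    apply pv_mk_congr
    intro t ht
    simp
  | cons a as ih =>
    intro g hmem hnd
    simp only [List.foldl_cons]
    rw [pv_dict_worlds_fold (PySem.Int.toStr a) (hmem a (List.mem_cons_self ..)) ws ws g,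
      ih _ (fun b hb => hmem b (List.mem_cons_of_mem a hb)) (List.nodup_cons.mp (by simpa using hnd)).2]
    apply pv_mk_congr
    intro t ht
    have hna : PySem.Int.toStr a ∉ as.map PySem.Int.toStr := (List.nodup_cons.mp (by simpa using hnd)).1
    by_cases hta : t = PySem.Int.toStr a
    · subst hta
      rw [if_neg (by exact fun h => hna h), if_pos rfl, if_pos (by simp)]
      rfl
    · have : (t ∈ (a :: as).map PySem.Int.toStr) ↔ (t ∈ as.map PySem.Int.toStr) := by
        simp [hta]
      by_cases htas : t ∈ as.map PySem.Int.toStr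
      · rw [if_pos htas, if_neg hta, if_pos (this.mpr htas)]
      · rw [if_neg htas, if_neg hta, if_neg (fun h => htas (this.mp h))]

lemma pv_dict_rewrite_fold {ks : List String} :
    ∀ (ks' : List String) (g : String → List (String × String)),
      ks'.Nodup → (∀ t ∈ ks', t ∈ ks) →
      ks'.foldl (fun d x => d.insert x (PySem.Set.ofList (d.getD x []))) (pvMk ks g) =
      pvMk ks (fun t => if t ∈ ks' then PySem.Set.ofList (g t) else g t) := by
  intro ks'
  induction ks' with
  | nil =>
    intro g _ _
    simp only [List.foldl_nil]
    apply pv_mk_congr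
    intro t ht
    simp
  | cons x ks' ih =>
    intro g hnd hsub
    simp only [List.foldl_cons]
    rw [pv_mk_getD g (hsub x (List.mem_cons_self ..)), pv_mk_insert g (hsub x (List.mem_cons_self ..)),
      ih _ (List.nodup_cons.mp hnd).2 (fun t ht => hsub t (List.mem_cons_of_mem x ht))]
    apply pv_mk_congr
    intro t ht
    have hx : x ∉ ks' := (List.nodup_cons.mp hnd).1
    by_cases htx : t = x
    · subst htx
      rw [if_neg hx, if_pos rfl, if_pos (List.mem_cons_self ..)]
    · by_cases hts : t ∈ ks'
      · rw [if_pos hts, if_neg htx, if_pos (List.mem_cons_of_mem x hts)]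
      · rw [if_neg hts, if_neg htx, if_neg (by simp [htx, hts])]

lemma pv_A_items (worlds : List String) (N : Int) :
    create_relations worlds N =
      ((PySem.List.pyRange 1 (N + 1) 1).map PySem.Int.toStr).map
        (fun t => (t, PySem.Set.ofList (pvLoopA (fun w => PySem.Str.isIn t w) worlds []))) := by
  have h0 : (PySem.List.pyRange 1 (N + 1) 1).foldl
        (fun d agent => d.insert (PySem.Int.toStr agent) []) PySem.Dict.empty
      = pvMk ((PySem.List.pyRange 1 (N + 1) 1).map PySem.Int.toStr) (fun _ => []) := by
    apply PySem.Dict.ext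
    rw [PySem.Dict.items_foldl_insert_fresh (PySem.List.pyRange 1 (N + 1) 1) PySem.Int.toStr
      (fun _ => []) _ (fun a _ => rfl) (pv_nodup_agents N)]
    simp [pvMk, List.map_map, PySem.Dict.empty]
  simp only [create_relations]
  rw [h0, pv_dict_agents_fold worlds (PySem.List.pyRange 1 (N + 1) 1) (fun _ => [])
    (fun a ha => List.mem_map_of_mem ha) (pv_nodup_agents N), pv_mk_keys,
    pv_dict_rewrite_fold ((PySem.List.pyRange 1 (N + 1) 1).map PySem.Int.toStr) _
      (pv_nodup_agents N) (fun t ht => ht)]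
  show ((PySem.List.pyRange 1 (N + 1) 1).map PySem.Int.toStr).map (fun t => (t, _)) = _
  apply List.map_congr_left
  intro t ht
  simp only [if_pos ht]

lemma pv_tailAfter_append_of_mem {y : String} {q z : List String} (hy : y ∈ q) :
    pvTailAfter y (q ++ z) = pvTailAfter y q ++ z := by
  induction q with
  | nil => simp at hy
  | cons a q ih =>
    by_cases hay : a = y
    · simp [pvTailAfter, hay]
    · have : y ∈ q := by
        rcases List.mem_cons.mp hy with h | h
        · exact absurd h.symm hay
        · exact h
      simp [pvTailAfter, hay, ih this]

lemma pv_inner_seen (P : String → Bool) {u seen : List String} (hnd : u.Nodup)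
    (hpre : seen <+: u) {x : String} (hx : x ∈ seen) :
    ∀ (r : List String), (∀ y ∈ r, y ∈ u) → ∀ L,
      PySem.Set.ofList L = pvBlocks P u seen →
      PySem.Set.ofList (r.foldl (fun L w2 => pvStep P L x w2) L) = pvBlocks P u seen := by
  intro r
  induction r with
  | nil => intro _ L hL; simpa using hL
  | cons y r ih =>
    intro hr L hL
    have hy : y ∈ u := hr y (List.mem_cons_self ..)
    have hxu : x ∈ u := hpre.sublist.mem hx
    simp only [List.foldl_cons]
    apply ih (fun z hz => hr z (List.mem_cons_of_mem y hz))
    rw [pv_step_eq]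
    by_cases hc : x ≠ y ∧ P x = P y ∧ (y, x) ∉ L
    · rw [if_pos hc]
      rcases pv_tailAfter_trichotomy hxu hy hc.1 with hafter | hbefore
      · have hmem : (x, y) ∈ PySem.Set.ofList L := by
          rw [hL]
          exact pv_mem_blocks.mpr ⟨hx, hc.2.1.symm, hafter⟩
        rw [pv_ofList_append_mem hmem, hL]
      · exfalso
        have hyseen : y ∈ seen := pv_prefix_closed hpre hnd hx hbefore
        have : (y, x) ∈ PySem.Set.ofList L := by
          rw [hL]
          exact pv_mem_blocks.mpr ⟨hyseen, hc.2.1, hbefore⟩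
        exact hc.2.2 ((PySem.Set.mem_ofList L (y, x)).mp this)
    · rw [if_neg hc]
      exact hL

lemma pv_inner_fresh (P : String → Bool) (ws : List String) {u seen : List String} {x : String}
    (hu : u = PySem.List.dedup ws) (hnd : u.Nodup)
    (hpre' : seen ++ [x] <+: u) (hxseen : x ∉ seen) :
    ∀ (r q' : List String) (L : List (String × String)), ws = q' ++ r →
      PySem.Set.ofList L = pvBlocks P u seen ++
        ((PySem.List.dedup q').filter
          (fun y => decide (y ∈ pvTailAfter x u) && (P y == P x))).map (fun y => (x, y)) →
      PySem.Set.ofList (r.foldl (fun L w2 => pvStep P L x w2) L) =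
        pvBlocks P u (seen ++ [x]) := by
  have hxu : x ∈ u := hpre'.sublist.mem (by simp)
  intro r
  induction r with
  | nil =>
    intro q' L hws hL
    rw [List.append_nil] at hws
    subst hws
    rw [← hu] at hL
    simp only [List.foldl_nil]
    rw [hL, pv_blocks_append]
    congr 1
    rw [← List.filter_filter, List.filter_comm,
      pv_filter_mem_sublist (pv_tailAfter_sublist x u) hnd]
    rfl
  | cons y r ih =>
    intro q' L hws hL
    have hyws : y ∈ ws := by rw [hws]; simp
    have hyu : y ∈ u := by rw [hu, PySem.List.mem_dedup]; exact hyws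
    have hws' : ws = (q' ++ [y]) ++ r := by rw [hws]; simp
    simp only [List.foldl_cons]
    apply ih (q' ++ [y]) _ hws'
    rw [pv_step_eq]
    set Dq := PySem.List.dedup q' with hDq
    set F := (fun y => decide (y ∈ pvTailAfter x u) && (P y == P x)) with hF
    by_cases hxy : x = y
    · subst hxy
      rw [if_neg (by rintro ⟨h, -, -⟩; exact h rfl), hL]
      congr 2
      rw [pv_dedup_append_singleton]
      by_cases hxq : x ∈ Dq
      · rw [if_pos hxq]
      · rw [if_neg hxq, List.filter_append]
        have : F x = false := by
          simp only [hF, Bool.and_eq_false_iff]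
          left
          simpa using pv_not_self_tailAfter hnd
        simp [this, hDq, PySem.List.dedup_eq_ofList]
    · by_cases hP : P x = P y
      · rcases pv_tailAfter_trichotomy hxu hyu hxy with hafter | hbefore
        · -- y comes after x in u
          have hynseen : y ∉ seen := by
            intro hyseen
            obtain ⟨rest, hrest⟩ := hpre'
            have : x ∈ pvTailAfter y u := by
              rw [← hrest, pv_tailAfter_append_of_mem (by simp [hyseen]),
                pv_tailAfter_append_of_mem hyseen]
              simp
            exact pv_tailAfter_asymm hnd hafter this
          have hnm : (y, x) ∉ L := by
            intro hmem
            have : (y, x) ∈ pvBlocks P u seen ++ (Dq.filter F).map (fun z => (x, z)) := by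
              rw [← hL]
              exact (PySem.Set.mem_ofList L (y, x)).mpr hmem
            rcases List.mem_append.mp this with hb | hp
            · exact hynseen (pv_mem_blocks.mp hb).1
            · obtain ⟨z, _, hz⟩ := List.mem_map.mp hp
              exact hxy (congrArg Prod.fst hz)
          rw [if_pos ⟨hxy, hP, hnm⟩]
          by_cases hyq : y ∈ Dq
          · have hmem : (x, y) ∈ PySem.Set.ofList L := by
              rw [hL]
              apply List.mem_append_right
              exact List.mem_map.mpr ⟨y, List.mem_filter.mpr ⟨hyq, by simp [hF, hafter, hP]⟩, rfl⟩
            rw [pv_ofList_append_mem hmem, hL]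
            congr 2
            rw [pv_dedup_append_singleton, ← hDq, if_pos hyq]
          · have hnmem : (x, y) ∉ PySem.Set.ofList L := by
              rw [hL]
              intro hmem
              rcases List.mem_append.mp hmem with hb | hp
              · exact hxseen (pv_mem_blocks.mp hb).1
              · obtain ⟨z, hz1, hz2⟩ := List.mem_map.mp hp
                obtain rfl : z = y := congrArg Prod.snd hz2
                exact hyq (List.mem_filter.mp hz1).1
            rw [pv_ofList_append_not_mem hnmem, hL,
              pv_dedup_append_singleton, ← hDq, if_neg hyq, List.filter_append]
            have hFy : F y = true := by simp [hF, hafter, hP]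
            simp [hFy]
        · -- y comes before x in u
          have hyseen : y ∈ seen := by
            have := pv_prefix_closed hpre' hnd (x := x) (y := y) (by simp) hbefore
            rcases List.mem_append.mp this with h | h
            · exact h
            · exact absurd (by simpa using h) (fun he => hxy (Eq.symm he))
          have hmem : (y, x) ∈ L := by
            have : (y, x) ∈ pvBlocks P u seen :=
              pv_mem_blocks.mpr ⟨hyseen, hP, hbefore⟩
            apply (PySem.Set.mem_ofList L (y, x)).mp
            rw [hL]
            exact List.mem_append_left _ this
          rw [if_neg (by rintro ⟨-, -, h⟩; exact h hmem), hL]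
          congr 2
          rw [pv_dedup_append_singleton, ← hDq]
          by_cases hyq : y ∈ Dq
          · rw [if_pos hyq]
          · rw [if_neg hyq, List.filter_append]
            have : F y = false := by
              simp only [hF, Bool.and_eq_false_iff]
              left
              simp only [decide_eq_false_iff_not]
              exact fun hafter => pv_tailAfter_asymm hnd hafter hbefore
            simp [this]
      · rw [if_neg (by rintro ⟨-, h, -⟩; exact hP h), hL]
        congr 2
        rw [pv_dedup_append_singleton, ← hDq]
        by_cases hyq : y ∈ Dq
        · rw [if_pos hyq]
        · rw [if_neg hyq, List.filter_append]
          have : F y = false := by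
            simp only [hF, Bool.and_eq_false_iff]
            right
            simpa using fun h => hP h.symm
          simp [this]

lemma pv_nodup_dedup (ws : List String) : (PySem.List.dedup ws).Nodup := by
  rw [PySem.List.dedup_eq_ofList]
  exact PySem.Set.nodup_ofList ws

lemma pv_outer (P : String → Bool) (ws : List String) :
    ∀ (o q : List String) (L : List (String × String)), ws = q ++ o →
      PySem.Set.ofList L = pvBlocks P (PySem.List.dedup ws) (PySem.List.dedup q) →
      PySem.Set.ofList (o.foldl (fun L w1 => ws.foldl (fun L w2 => pvStep P L w1 w2) L) L) =
        pvBlocks P (PySem.List.dedup ws) (PySem.List.dedup ws) := by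
  intro o
  induction o with
  | nil =>
    intro q L hws hL
    rw [List.append_nil] at hws
    subst hws
    simpa using hL
  | cons x o ih =>
    intro q L hws hL
    have hnd : (PySem.List.dedup ws).Nodup := pv_nodup_dedup ws
    have hxws : x ∈ ws := by rw [hws]; simp
    have hws' : ws = (q ++ [x]) ++ o := by rw [hws]; simp
    have hyall : ∀ y ∈ ws, y ∈ PySem.List.dedup ws := fun y hy => (PySem.List.mem_dedup ws y).mpr hy
    simp only [List.foldl_cons]
    by_cases hx : x ∈ PySem.List.dedup q
    · apply ih (q ++ [x]) _ hws'
      rw [pv_dedup_append_singleton, if_pos hx]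
      have hpre : PySem.List.dedup q <+: PySem.List.dedup ws := by
        rw [hws]
        exact pv_dedup_prefix q (x :: o)
      exact pv_inner_seen P hnd hpre hx ws hyall L hL
    · apply ih (q ++ [x]) _ hws'
      rw [pv_dedup_append_singleton, if_neg hx]
      have hpre' : PySem.List.dedup q ++ [x] <+: PySem.List.dedup ws := by
        have := pv_dedup_prefix (q ++ [x]) o
        rw [pv_dedup_append_singleton, if_neg hx] at this
        rw [hws']
        exact this
      apply pv_inner_fresh P ws rfl hnd hpre' hx ws [] L (by simp)
      simpa using hL

lemma pv_A_loop (P : String → Bool) (ws : List String) :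
    PySem.Set.ofList (pvLoopA P ws []) = pvCanon P (PySem.List.dedup ws) := by
  rw [pvLoopA, pv_outer P ws ws [] [] rfl rfl, pv_blocks_self (pv_nodup_dedup ws)]

lemma pv_pairsLoop (P : String → Bool) :
    ∀ (u : List String) (acc : PySem.Set (String × String)),
      pvPairsLoop (u.map (fun w => (w, P w))) acc = PySem.Set.update acc (pvCanon P u) := by
  intro u
  induction u with
  | nil => intro acc; simp [pvPairsLoop, pvCanon, PySem.Set.update_nil]
  | cons x u ih =>
    intro acc
    simp only [List.map_cons, pvPairsLoop]
    rw [List.foldl_map]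
    have hfold : u.foldl (fun s y => if P y = P x then PySem.Set.add s (x, y) else s) acc =
        PySem.Set.update acc ((u.filter (fun y => P y == P x)).map (fun y => (x, y))) := by
      rw [PySem.List.foldl_ite_eq_foldl_filter (fun y => P y = P x)
        (fun s y => PySem.Set.add s (x, y)) u acc]
      rw [PySem.Set.update_map_eq_foldl_add]
      rfl
    rw [hfold, ih, pvCanon, ← PySem.Set.update_append]

lemma pv_B_items (worlds : List String) (N : Int) :
    create_relations_alt worlds N =
      ((PySem.List.pyRange 1 (N + 1) 1).map PySem.Int.toStr).map
        (fun t => (t, pvPairsLoop ((PySem.List.dedup worlds).map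
          (fun w => (w, PySem.Str.isIn t w))) PySem.Set.empty)) := by
  simp only [create_relations_alt]
  rw [PySem.Dict.items_foldl_insert_fresh (PySem.List.pyRange 1 (N + 1) 1)
    PySem.Int.toStr
    (fun agent => pvPairsLoop ((PySem.List.dedup worlds).map
      (fun w => (w, PySem.Str.isIn (PySem.Int.toStr agent) w))) PySem.Set.empty)
    PySem.Dict.empty (fun a _ => rfl) (pv_nodup_agents N)]
  simp only [List.map_map]
  show [] ++ _ = _
  rw [List.nil_append]
  apply List.map_congr_left
  intro a _
  simp [PySem.Int.toList_toStr]

theorem pv_final (worlds : List String) (N : Int) :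
    create_relations worlds N = create_relations_alt worlds N := by
  rw [pv_A_items, pv_B_items]
  apply List.map_congr_left
  intro t _
  have hB := pv_pairsLoop (fun w => PySem.Str.isIn t w) (PySem.List.dedup worlds) PySem.Set.empty
  rw [hB, PySem.Set.update_empty, pv_A_loop,
    PySem.Set.ofList_eq_self_of_nodup _ (pv_canon_nodup (pv_nodup_dedup worlds))]


-- ===== VERDICT (by name: the statement is the Claim_ definition above) =====
theorem create_relations_spec : Claim_equal_create_relations := by
  intro worlds N _
  show create_relations worlds N = create_relations_alt worlds N
  exact pv_final worlds N
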